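-- pv_equiv track=rewrite | github.com/harshbhanushali26/hArI | core/query_intent.py | query_classifier
-- ===== SOURCE A (Python) =====
-- def query_classifier(files) -> str:
--     """
--     Checks uploaded file types and returns routing decision.
--
--     Args:
--         files: list of file metadata dicts from st.session_state.uploaded_files
--                each dict has keys: filename, file_type, detail, size
--
--     Returns:
--         "pdf"  — only PDF files present
--         "csv"  — only CSV/Excel files present
--         "mix"  — both types present, needs LLM classification
--     """
--     has_pdf = any(f["file_type"] == "pdf"            for f in files)
--     has_csv = any(f["file_type"] in ["csv", "excel"] for f in files)
--
--     if has_pdf and not has_csv: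
--         return "pdf"
--     if has_csv and not has_pdf:
--         return "csv"
--     return "mix"
-- ===== SOURCE B (Python) =====
-- def query_classifier(files) -> str:
--     # Single-pass state machine with early exit: remember the one kind seen so
--     # far ("pdf" or "csv"); the first conflicting kind proves a mix immediately.
--     state = None
--     for f in files:
--         t = f["file_type"]
--         kind = "pdf" if t == "pdf" else ("csv" if t in ("csv", "excel") else None)
--         if kind is None:
--             continue
--         if state is None:
--             state = kind
--         elif state != kind:
--             return "mix"
--     return state if state is not None else "mix"
-- ===== Notes on version B (the rewrite author's own statement) =====
-- stated objective: alternative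
-- what changed: B replaces A's two independent any-scans plus a final branch chain by a single-pass state machine that remembers the one kind seen so far and returns 'mix' immediately at the first conflicting kind.
import Mathlib
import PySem

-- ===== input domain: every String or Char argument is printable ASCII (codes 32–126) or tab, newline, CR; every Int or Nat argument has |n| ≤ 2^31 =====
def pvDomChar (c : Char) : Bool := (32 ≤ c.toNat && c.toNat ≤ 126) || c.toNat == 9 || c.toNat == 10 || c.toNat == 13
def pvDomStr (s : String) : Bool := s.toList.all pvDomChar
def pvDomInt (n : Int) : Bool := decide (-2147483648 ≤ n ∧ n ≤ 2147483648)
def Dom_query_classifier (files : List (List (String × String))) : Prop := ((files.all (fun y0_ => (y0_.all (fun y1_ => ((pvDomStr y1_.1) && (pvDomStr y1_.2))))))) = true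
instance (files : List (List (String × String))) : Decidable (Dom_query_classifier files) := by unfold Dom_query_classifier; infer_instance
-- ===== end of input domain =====

-- B replaces A's two independent any-scans + branch chain by a single-pass
-- state machine with early exit at the first conflicting file kind (alternative; same cost).


-- dict lookup f["file_type"] (dict as assoc list: first match; none = KeyError)
def pvFType? (f : List (String × String)) : Option String :=
  (f.find? (fun kv => kv.1 == "file_type")).map (·.2)

-- ===== PORT A =====
def query_classifier (files : List (List (String × String))) : String :=
  let has_pdf := files.any (fun f => pvFType? f == some "pdf")
  let has_csv := files.any (fun f =>
    match pvFType? f with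
    | some t => t == "csv" || t == "excel"
    | none => false)
  if has_pdf && !has_csv then "pdf"
  else if has_csv && !has_pdf then "csv"
  else "mix"

-- ===== PORT B =====
-- kind of one file: some "pdf" / some "csv" (csv or excel) / none (other type)
def pvKind (f : List (String × String)) : Option String :=
  let t := (pvFType? f).getD ""
  if t == "pdf" then some "pdf"
  else if t == "csv" || t == "excel" then some "csv"
  else none

-- B's loop: state = the one kind seen so far; first conflict returns "mix"
def qcLoop : List (List (String × String)) → Option String → String
  | [], state => state.getD "mix"
  | f :: fs, state =>
    match pvKind f with
    | none => qcLoop fs state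
    | some k =>
      match state with
      | none => qcLoop fs (some k)
      | some s => if s == k then qcLoop fs state else "mix"

def query_classifier_alt (files : List (List (String × String))) : String :=
  qcLoop files none

-- ===== PRECONDITION & SPEC =====
def pvHasKey (f : List (String × String)) : Bool := f.any (fun kv => kv.1 == "file_type")
-- Pre_ excludes exactly the inputs on which both Pythons raise KeyError: some file
-- lacks a "file_type" key AND the short-circuiting scans actually reach it (i.e. it
-- is NOT the case that both a pdf and a csv/excel file occur before the first
-- missing-key file).
def Pre_query_classifier (files : List (List (String × String))) : Prop :=
  (files.all pvHasKey) = true ∨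
  (((files.takeWhile pvHasKey).any (fun f => pvFType? f == some "pdf")) = true ∧
   ((files.takeWhile pvHasKey).any (fun f =>
      match pvFType? f with
      | some t => t == "csv" || t == "excel"
      | none => false)) = true)
instance (files : List (List (String × String))) : Decidable (Pre_query_classifier files) := by unfold Pre_query_classifier; infer_instance
def pvWitness_query_classifier : (List (List (String × String))) :=
  [[("file_type", "pdf")], [("file_type", "csv"), ("size", "3")]]
def Spec_query_classifier (files : List (List (String × String))) (out : String) : Prop := out = query_classifier_alt files
instance (files : List (List (String × String))) (out : String) : Decidable (Spec_query_classifier files out) := by unfold Spec_query_classifier; infer_instance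

-- ===== CLAIM (what is proved, stated in full; the proofs are below) =====
def Claim_equal_query_classifier : Prop := ∀ (files : List (List (String × String))), Dom_query_classifier files → Pre_query_classifier files → Spec_query_classifier files (query_classifier files)

-- ===== LEMMAS AND PROOFS =====

theorem pvKind_cases (f : List (String × String)) :
    pvKind f = none ∨ pvKind f = some "pdf" ∨ pvKind f = some "csv" := by
  simp only [pvKind]
  split_ifs <;> simp

-- abbreviations for the two scans, on B's kind function
def hasP (fs : List (List (String × String))) : Bool := fs.any (fun f => pvKind f == some "pdf")
def hasC (fs : List (List (String × String))) : Bool := fs.any (fun f => pvKind f == some "csv")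

theorem loop_pdf (fs : List (List (String × String))) :
    qcLoop fs (some "pdf") = if hasC fs then "mix" else "pdf" := by
  induction fs with
  | nil => rfl
  | cons f fs ih =>
    rcases pvKind_cases f with h | h | h <;>
      simp [qcLoop, h, hasC, List.any_cons, ih] at *

theorem loop_csv (fs : List (List (String × String))) :
    qcLoop fs (some "csv") = if hasP fs then "mix" else "csv" := by
  induction fs with
  | nil => rfl
  | cons f fs ih =>
    rcases pvKind_cases f with h | h | h <;>
      simp [qcLoop, h, hasP, List.any_cons, ih] at *

theorem loop_none (fs : List (List (String × String))) :
    qcLoop fs none =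
      if hasP fs && !hasC fs then "pdf"
      else if hasC fs && !hasP fs then "csv"
      else "mix" := by
  induction fs with
  | nil => rfl
  | cons f fs ih =>
    rcases pvKind_cases f with h | h | h
    · simpa [qcLoop, h, hasP, hasC, List.any_cons] using ih
    · simp [qcLoop, h, hasP, hasC, List.any_cons, loop_pdf]
      split_ifs <;> first | rfl | (exfalso; push Not at *; tauto)
    · simp [qcLoop, h, hasP, hasC, List.any_cons, loop_csv]
      split_ifs <;> first | rfl | (exfalso; push Not at *; tauto)

theorem any_congr_mem (l : List (List (String × String))) (p q : List (String × String) → Bool)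
    (h : ∀ x ∈ l, p x = q x) : l.any p = l.any q := by
  induction l with
  | nil => rfl
  | cons x xs ih =>
    simp only [List.any_cons, h x (by simp), ih (fun y hy => h y (by simp [hy]))]

theorem query_classifier_spec : Claim_equal_query_classifier := by
  intro files _ _
  unfold Spec_query_classifier query_classifier query_classifier_alt
  rw [loop_none]
  have hp : files.any (fun f => pvFType? f == some "pdf") = hasP files := by
    unfold hasP
    refine any_congr_mem _ _ _ (fun f _ => ?_)
    cases ht : pvFType? f with
    | none => simp [pvKind, ht]
    | some t =>
      simp only [pvKind, ht, Option.getD_some]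
      split_ifs with h1 h2 <;> simp_all
  have hc : (files.any (fun f =>
      match pvFType? f with
      | some t => t == "csv" || t == "excel"
      | none => false)) = hasC files := by
    unfold hasC
    refine any_congr_mem _ _ _ (fun f _ => ?_)
    cases ht : pvFType? f with
    | none => simp [pvKind, ht]
    | some t =>
      simp only [pvKind, ht, Option.getD_some]
      split_ifs with h1 h2 <;> simp_all
  simp only [hp, hc]
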